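-- pv_equiv track=rewrite | github.com/ak110/dotfiles | pytools/claudize.py | _remove_base_reference
-- ===== SOURCE A (Python) =====
-- def _remove_base_reference(content: str) -> str:
--     """CLAUDE.md から @CLAUDE.base.md 参照とその前後の空行を除去する。"""
--     lines = content.splitlines(keepends=True)
--     filtered: list[str] = []
--     for line in lines:
--         if line.strip() == "@CLAUDE.base.md":
--             # 参照行の直前の空行も除去
--             while filtered and filtered[-1].strip() == "":
--                 filtered.pop()
--             continue
--         filtered.append(line)
--     return "".join(_collapse_blank_lines(filtered))
--
-- def _collapse_blank_lines(lines: list[str]) -> list[str]: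
--     """連続する空行を1つに圧縮する。"""
--     result: list[str] = []
--     prev_blank = False
--     for line in lines:
--         is_blank = line.strip() == ""
--         if is_blank and prev_blank:
--             continue
--         result.append(line)
--         prev_blank = is_blank
--     return result
-- ===== SOURCE B (Python) =====
-- def _remove_base_reference(content: str) -> str:
--     """Single backward pass: a 'skipping' flag removes blanks before a reference
--     line, and blank runs are collapsed by replacing the head of the output."""
--     out: list[str] = []
--     skipping = False
--     for line in reversed(content.splitlines(keepends=True)):
--         stripped = line.strip()
--         if stripped == "@CLAUDE.base.md":
--             skipping = True
--         elif stripped == "":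
--             if not skipping:
--                 if out and out[0].strip() == "":
--                     out[0] = line
--                 else:
--                     out.insert(0, line)
--         else:
--             skipping = False
--             out.insert(0, line)
--     return "".join(out)
-- ===== Notes on version B (the rewrite author's own statement) =====
-- stated objective: alternative
-- what changed: A's two forward passes (filter with backward while-pops, then a blank-collapse pass) are replaced by one backward pass over reversed lines that uses a skip flag instead of popping and collapses blank runs by replacing the head of the output.
import Mathlib
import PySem

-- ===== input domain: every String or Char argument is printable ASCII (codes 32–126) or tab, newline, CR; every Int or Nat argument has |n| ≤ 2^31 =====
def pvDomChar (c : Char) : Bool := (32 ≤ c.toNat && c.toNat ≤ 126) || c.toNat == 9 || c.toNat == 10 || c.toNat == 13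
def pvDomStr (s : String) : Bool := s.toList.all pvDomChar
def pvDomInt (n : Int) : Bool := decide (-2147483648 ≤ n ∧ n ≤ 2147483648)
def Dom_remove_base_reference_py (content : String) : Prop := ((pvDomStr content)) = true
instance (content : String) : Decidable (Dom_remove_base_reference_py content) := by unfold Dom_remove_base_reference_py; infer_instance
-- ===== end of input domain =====

-- B replaces A's two passes (filter with while-pops, then collapse) by ONE backward pass
-- with a skip flag and head-replacement collapse; objective: alternative decomposition.

-- shared helper of both Pythons: content.splitlines(keepends=True).
-- Exact on Dom: there the only line terminators occurring are '\n', '\r', '\r\n'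
-- (Python's extra terminators \v \f \x1c-\x1e \x85 \u2028 \u2029 lie outside Dom).
def pvSplitKeep (cur : List Char) : List Char → List (List Char)
  | [] => if cur.isEmpty then [] else [cur.reverse]
  | '\r' :: '\n' :: rest => (cur.reverse ++ ['\r', '\n']) :: pvSplitKeep [] rest
  | '\r' :: rest => (cur.reverse ++ ['\r']) :: pvSplitKeep [] rest
  | '\n' :: rest => (cur.reverse ++ ['\n']) :: pvSplitKeep [] rest
  | c :: rest => pvSplitKeep (c :: cur) rest

def pvRef : List Char := "@CLAUDE.base.md".toList

-- line.strip() == ""  /  line.strip() == "@CLAUDE.base.md"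
def pvBlank (l : List Char) : Bool := PySem.Chars.strip l == []
def pvIsRef (l : List Char) : Bool := PySem.Chars.strip l == pvRef

-- ===== PORT A =====
-- while filtered and filtered[-1].strip() == "": filtered.pop()
-- (popping from the back while blank = dropWhile on the reverse)
def pvPopBlanks (acc : List (List Char)) : List (List Char) :=
  ((acc.reverse).dropWhile pvBlank).reverse

def pvAStep (acc : List (List Char)) (l : List Char) : List (List Char) :=
  if pvIsRef l then pvPopBlanks acc else acc ++ [l]

-- one step of _collapse_blank_lines, state = (result, prev_blank)
def pvCStep (st : List (List Char) × Bool) (l : List Char) : List (List Char) × Bool :=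
  let isb := pvBlank l
  if isb && st.2 then st else (st.1 ++ [l], isb)

def remove_base_reference_py (content : String) : String :=
  let lines := pvSplitKeep [] content.toList
  let filtered := lines.foldl pvAStep []
  String.mk (((filtered.foldl pvCStep ([], false)).1).flatten)

-- ===== PORT B =====
-- one step of B's backward loop, state = (out, skipping); lines visited in reverse
def pvBStep (st : List (List Char) × Bool) (l : List Char) : List (List Char) × Bool :=
  let s := PySem.Chars.strip l
  if s == pvRef then (st.1, true)
  else if s == [] then
    if st.2 then st
    else
      match st.1 with
      | [] => ([l], st.2)
      | h :: t => if pvBlank h then (l :: t, st.2) else (l :: h :: t, st.2)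
  else (l :: st.1, false)

def remove_base_reference_py_alt (content : String) : String :=
  let lines := pvSplitKeep [] content.toList
  String.mk ((((lines.reverse).foldl pvBStep ([], false)).1).flatten)

-- ===== PRECONDITION & SPEC =====
def Spec_remove_base_reference_py (content : String) (out : String) : Prop := out = remove_base_reference_py_alt content
instance (content : String) (out : String) : Decidable (Spec_remove_base_reference_py content out) := by unfold Spec_remove_base_reference_py; infer_instance

-- ===== CLAIM (what is proved, stated in full; the proofs are below) =====
def Claim_equal_remove_base_reference_py : Prop := ∀ (content : String), Dom_remove_base_reference_py content → Spec_remove_base_reference_py content (remove_base_reference_py content)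

-- ===== LEMMAS AND PROOFS =====

-- killL lines: the suffix starts with blank* followed by a reference line
def killL : List (List Char) → Bool
  | [] => false
  | l :: rest => pvIsRef l || (pvBlank l && killL rest)

-- right-to-left characterization of A's filtering pass
def filtR : List (List Char) → List (List Char)
  | [] => []
  | l :: rest =>
      if pvIsRef l then filtR rest
      else if pvBlank l && killL rest then filtR rest
      else l :: filtR rest

-- right-recursive blank collapse (keeps the FIRST blank of each run)
def cB : List (List Char) → List (List Char)
  | [] => []
  | l :: rest =>
      if pvBlank l then
        match cB rest with
        | [] => [l]
        | h :: t => if pvBlank h then l :: t else l :: h :: t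
      else l :: cB rest

theorem dropWhile_idem {α : Type} (p : α → Bool) (xs : List α) :
    (xs.dropWhile p).dropWhile p = xs.dropWhile p := by
  induction xs with
  | nil => rfl
  | cons x xs ih =>
    by_cases h : p x = true
    · simp [List.dropWhile_cons, h, ih]
    · simp [List.dropWhile_cons, h]

theorem popB_idem (acc : List (List Char)) :
    pvPopBlanks (pvPopBlanks acc) = pvPopBlanks acc := by
  simp [pvPopBlanks, dropWhile_idem]

theorem popB_append_blank (acc : List (List Char)) (l : List Char) (h : pvBlank l = true) :
    pvPopBlanks (acc ++ [l]) = pvPopBlanks acc := by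
  simp [pvPopBlanks, List.dropWhile_cons, h]

theorem popB_append_nonblank (acc : List (List Char)) (l : List Char) (h : pvBlank l = false) :
    pvPopBlanks (acc ++ [l]) = acc ++ [l] := by
  simp [pvPopBlanks, List.dropWhile_cons, h]

theorem filt_eq (lines : List (List Char)) : ∀ acc,
    lines.foldl pvAStep acc = (if killL lines then pvPopBlanks acc else acc) ++ filtR lines := by
  induction lines with
  | nil => intro acc; simp [killL, filtR]
  | cons l rest ih =>
    intro acc
    by_cases hr : pvIsRef l = true
    · simp only [List.foldl_cons, pvAStep, hr, if_pos, ih, killL, filtR, Bool.true_or, if_true]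
      by_cases hk : killL rest = true
      · simp [hk, popB_idem]
      · simp [hk]
    · by_cases hb : pvBlank l = true
      · simp only [List.foldl_cons, pvAStep, hr, if_neg, Bool.false_eq_true, not_false_iff,
          if_false, ih, killL, filtR, hb, Bool.true_and, Bool.false_or]
        by_cases hk : killL rest = true
        · simp [hk, hr, hb, popB_append_blank]
        · simp [hk, hr, hb]
      · simp only [List.foldl_cons, pvAStep, hr, if_neg, Bool.false_eq_true, not_false_iff,
          if_false, ih, killL, filtR, hb, Bool.false_and, Bool.false_or, Bool.or_false]
        by_cases hk : killL rest = true
        · simp [hk, hr, hb, popB_append_nonblank]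
        · simp [hk, hr, hb]

theorem cB_blank_cons (xs : List (List Char)) : ∀ x, pvBlank x = true →
    cB (x :: xs) = x :: cB (xs.dropWhile pvBlank) := by
  induction xs with
  | nil => intro x hx; simp [cB, hx]
  | cons y ys ih =>
    intro x hx
    by_cases hy : pvBlank y = true
    · have h2 := ih y hy
      simp only [cB, hx, if_pos] at h2 ⊢
      rw [h2]
      simp [hy, List.dropWhile_cons]
    · simp [cB, hx, hy, List.dropWhile_cons]

theorem pvCollapse_eq (xs : List (List Char)) : ∀ res prev,
    (xs.foldl pvCStep (res, prev)).1
      = res ++ (if prev then cB (xs.dropWhile pvBlank) else cB xs) := by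
  induction xs with
  | nil => intro res prev; cases prev <;> simp [cB]
  | cons x xs ih =>
    intro res prev
    cases prev with
    | true =>
      by_cases hx : pvBlank x = true
      · simp [pvCStep, hx, ih, List.dropWhile_cons]
      · simp [pvCStep, hx, ih, List.dropWhile_cons, cB]
    | false =>
      by_cases hx : pvBlank x = true
      · simp [pvCStep, hx, ih, cB_blank_cons xs x hx]
      · simp [pvCStep, hx, ih, cB]

theorem bfold_eq (lines : List (List Char)) :
    lines.foldr (fun l st => pvBStep st l) ([], false) = (cB (filtR lines), killL lines) := by
  induction lines with
  | nil => simp [filtR, killL, cB]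
  | cons l rest ih =>
    simp only [List.foldr_cons, ih]
    by_cases hr : pvIsRef l = true
    · have : (PySem.Chars.strip l == pvRef) = true := hr
      simp [pvBStep, this, filtR, killL, hr]
    · have hr' : (PySem.Chars.strip l == pvRef) = false := by
        simpa [pvIsRef] using hr
      by_cases hb : pvBlank l = true
      · have hb' : (PySem.Chars.strip l == ([] : List Char)) = true := hb
        by_cases hk : killL rest = true
        · simp [pvBStep, hr', hb', hk, filtR, killL, hr, hb]
        · have : filtR (l :: rest) = l :: filtR rest := by
            simp [filtR, hr, hb, hk]
          simp only [pvBStep, hr', hb', hk, this, killL, hr, hb]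
          cases h : cB (filtR rest) with
          | nil => simp [cB, hb, h, hk]
          | cons hd tl =>
            by_cases hh : pvBlank hd = true
            · simp [cB, hb, h, hh, hk]
            · simp [cB, hb, h, hh, hk]
      · have hb' : (PySem.Chars.strip l == ([] : List Char)) = false := by
          simpa [pvBlank] using hb
        simp [pvBStep, hr', hb', filtR, killL, hr, hb, cB]

-- ===== VERDICT (by name: the statement is the Claim_ definition above) =====
theorem remove_base_reference_py_spec : Claim_equal_remove_base_reference_py := by
  intro content _
  unfold Spec_remove_base_reference_py remove_base_reference_py remove_base_reference_py_alt
  dsimp only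
  rw [List.foldl_reverse, bfold_eq, filt_eq, pvCollapse_eq]
  simp [pvPopBlanks]
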